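-- pv_equiv track=rewrite | github.com/yashs33244/synthatext | backend/generate_ppt.py | distribute_content_to_slides
-- ===== SOURCE A (Python) =====
-- def distribute_content_to_slides(pages, num_slides):
--     """Distribute source pages across the specified number of slides."""
--     if num_slides == -1 or num_slides >= len(pages):
--         # One slide per page
--         return [[page] for page in pages]
--
--     if num_slides <= 0:
--         num_slides = 1
--
--     # Distribute pages across slides
--     slides_content = [[] for _ in range(num_slides)]
--
--     for i, page in enumerate(pages):
--         slide_idx = i * num_slides // len(pages)
--         if slide_idx >= num_slides:
--             slide_idx = num_slides - 1
--         slides_content[slide_idx].append(page)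
--
--     # Remove empty slides
--     slides_content = [s for s in slides_content if s]
--
--     return slides_content
-- ===== SOURCE B (Python) =====
-- def distribute_content_to_slides(pages, num_slides):
--     """Distribute source pages across the specified number of slides.
--
--     Gathers each slide's contiguous page range with ceiling-division
--     boundaries instead of scattering pages one by one."""
--     n = len(pages)
--     if num_slides == -1 or num_slides >= n:
--         return [[page] for page in pages]
--     if not pages:
--         return []
--     m = max(num_slides, 1)
--     return [pages[-(-(j * n) // m):-(-((j + 1) * n) // m)] for j in range(m)]
-- ===== Notes on version B (the rewrite author's own statement) =====
-- stated objective: alternative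
-- what changed: Instead of scattering pages one by one into a preallocated list of slides via i*num_slides//len(pages) and filtering out empty slides, B computes each slide's contiguous page range directly with ceiling-division boundaries and slices the pages list once per slide.
import Mathlib
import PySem

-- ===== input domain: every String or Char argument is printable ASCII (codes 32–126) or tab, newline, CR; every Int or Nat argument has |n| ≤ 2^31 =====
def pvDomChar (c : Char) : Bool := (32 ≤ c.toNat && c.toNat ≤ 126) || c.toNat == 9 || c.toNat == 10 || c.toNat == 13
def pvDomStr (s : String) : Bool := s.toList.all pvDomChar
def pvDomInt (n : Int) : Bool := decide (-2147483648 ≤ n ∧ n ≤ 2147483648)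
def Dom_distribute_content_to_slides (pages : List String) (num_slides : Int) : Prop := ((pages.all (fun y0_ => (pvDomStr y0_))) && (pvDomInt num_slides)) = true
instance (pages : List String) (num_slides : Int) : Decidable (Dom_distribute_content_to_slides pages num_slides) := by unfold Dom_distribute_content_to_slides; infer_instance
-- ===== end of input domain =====

-- B gathers each slide's contiguous page range via ceiling-division boundaries and slices,
-- instead of A's scatter of pages one by one into preallocated slides plus an empty-slide filter.


-- ===== PORT A =====
-- Literal transliteration of A: one-slide-per-page guard, clamp, scatter loop, empty-slide filter.
-- slide_idx is provably ≥ 0 whenever the loop body runs (i, ns ≥ 0), so .toNat is exact here.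
def distribute_content_to_slides (pages : List String) (num_slides : Int) : List (List String) :=
  if num_slides = -1 ∨ num_slides ≥ (pages.length : Int) then
    pages.map (fun page => [page])
  else
    let ns : Int := if num_slides ≤ 0 then 1 else num_slides
    let slides := (PySem.List.enumerate pages 0).foldl
      (fun acc ip =>
        let slide_idx := PySem.Int.floordiv (ip.1 * ns) (pages.length : Int)
        let slide_idx := if slide_idx ≥ ns then ns - 1 else slide_idx
        acc.modify slide_idx.toNat (· ++ [ip.2]))
      (List.replicate ns.toNat [])
    slides.filter (fun s => !s.isEmpty)

-- ===== PORT B =====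
def distribute_content_to_slides_alt (pages : List String) (num_slides : Int) : List (List String) :=
  let n : Int := pages.length
  if num_slides = -1 ∨ num_slides ≥ n then
    pages.map (fun p => [p])
  else if pages = [] then
    []
  else
    let m : Int := max num_slides 1
    (PySem.List.pyRange 0 m 1).map (fun j =>
      PySem.List.slice pages (some (-(PySem.Int.floordiv (-(j * n)) m)))
                             (some (-(PySem.Int.floordiv (-((j + 1) * n)) m))))

-- ===== PRECONDITION & SPEC =====
def Spec_distribute_content_to_slides (pages : List String) (num_slides : Int) (out : List (List String)) : Prop := out = distribute_content_to_slides_alt pages num_slides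
instance (pages : List String) (num_slides : Int) (out : List (List String)) : Decidable (Spec_distribute_content_to_slides pages num_slides out) := by unfold Spec_distribute_content_to_slides; infer_instance

-- ===== CLAIM (what is proved, stated in full; the proofs are below) =====
def Claim_equal_distribute_content_to_slides : Prop := ∀ (pages : List String) (num_slides : Int), Dom_distribute_content_to_slides pages num_slides → Spec_distribute_content_to_slides pages num_slides (distribute_content_to_slides pages num_slides)

-- ===== LEMMAS AND PROOFS =====

-- ceiling boundary lo j = ⌈j*n/m⌉, as B computes it
def pvLo (n m j : Int) : Int := -(PySem.Int.floordiv (-(j * n)) m)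

lemma pvLo_bracket (n m j : Int) (hm : 0 < m) :
    (pvLo n m j - 1) * m < j * n ∧ j * n ≤ pvLo n m j * m := by
  exact (PySem.Int.neg_floordiv_neg_eq_iff_of_pos hm).mp rfl

lemma pvLo_nonneg (n m j : Int) (hm : 0 < m) (hn : 0 ≤ n) (hj : 0 ≤ j) : 0 ≤ pvLo n m j := by
  have h := (pvLo_bracket n m j hm).2
  by_contra hneg
  push Not at hneg
  have h1 : pvLo n m j ≤ -1 := by omega
  have h2 : pvLo n m j * m ≤ -1 * m := mul_le_mul_of_nonneg_right h1 (le_of_lt hm)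
  have h3 : 0 ≤ j * n := mul_nonneg hj hn
  omega

lemma pvLo_mono (n m j j' : Int) (hm : 0 < m) (hn : 0 ≤ n) (hjj : j ≤ j') :
    pvLo n m j ≤ pvLo n m j' := by
  have h1 := (pvLo_bracket n m j hm).1
  have h2 := (pvLo_bracket n m j' hm).2
  have h3 : j * n ≤ j' * n := mul_le_mul_of_nonneg_right hjj hn
  have h4 : (pvLo n m j - 1) * m < pvLo n m j' * m := by omega
  have := lt_of_mul_lt_mul_right h4 (le_of_lt hm)
  omega

lemma pvLo_strict (n m j : Int) (hm : 0 < m) (hmn : m ≤ n) :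
    pvLo n m j < pvLo n m (j + 1) := by
  have h1 := (pvLo_bracket n m j hm).1
  have h2 := (pvLo_bracket n m (j + 1) hm).2
  have hexp : (j + 1) * n = j * n + n := by ring
  have e1 : (pvLo n m j - 1) * m = pvLo n m j * m - m := by ring
  have h4 : pvLo n m j * m < pvLo n m (j + 1) * m := by omega
  exact lt_of_mul_lt_mul_right h4 (le_of_lt hm)

lemma pvLo_top (n m : Int) (hm : 0 < m) : pvLo n m m = n := by
  have h1 := (pvLo_bracket n m m hm).1
  have h2 := (pvLo_bracket n m m hm).2
  have hc : m * n = n * m := mul_comm m n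
  have e1 : (pvLo n m m - 1) * m = pvLo n m m * m - m := by ring
  have e2 : (n - 1) * m = n * m - m := by ring
  have hl : (n - 1) * m < pvLo n m m * m := by omega
  have hr : (pvLo n m m - 1) * m < n * m := by omega
  have hll := lt_of_mul_lt_mul_right hl (le_of_lt hm)
  have hrr := lt_of_mul_lt_mul_right hr (le_of_lt hm)
  omega

-- floor assignment ↔ ceiling interval
lemma floordiv_eq_iff_interval (n m i j : Int) (hm : 0 < m) (hn : 0 < n) :
    PySem.Int.floordiv (i * m) n = j ↔ (pvLo n m j ≤ i ∧ i < pvLo n m (j + 1)) := by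
  rw [PySem.Int.floordiv_eq_iff_of_pos hn]
  have hbj := pvLo_bracket n m j hm
  have hbj1 := pvLo_bracket n m (j + 1) hm
  constructor
  · rintro ⟨h1, h2⟩
    constructor
    · have h4 : (pvLo n m j - 1) * m < i * m := by omega
      have := lt_of_mul_lt_mul_right h4 (le_of_lt hm)
      omega
    · have h4 : i * m < pvLo n m (j + 1) * m := by omega
      exact lt_of_mul_lt_mul_right h4 (le_of_lt hm)
  · rintro ⟨h1, h2⟩
    constructor
    · have := mul_le_mul_of_nonneg_right h1 (le_of_lt hm)
      omega
    · have h4 : i ≤ pvLo n m (j + 1) - 1 := by omega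
      have := mul_le_mul_of_nonneg_right h4 (le_of_lt hm)
      omega

-- characterize A's scatter fold by lookup
lemma fold_modify_getElem? (L : List (Int × String)) (g : Int → Nat)
    (acc : List (List String)) (k : Nat) :
    (L.foldl (fun a p => a.modify (g p.1) (· ++ [p.2])) acc)[k]?
      = (acc[k]?).map (· ++ (L.filter (fun p => g p.1 == k)).map (·.2)) := by
  induction L generalizing acc with
  | nil => simp
  | cons p L ih =>
    simp only [List.foldl_cons, List.filter_cons]
    rw [ih]
    by_cases h : g p.1 = k
    · simp [h, Option.map_map, Function.comp_def]
    · simp [h]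

-- filter of enumerate by an index interval is a drop/take window
lemma filter_enumerate_interval (xs : List String) (s a b : Int) :
    (((PySem.List.enumerate xs s).filter (fun p => decide (a ≤ p.1 ∧ p.1 < b))).map (·.2))
      = (xs.drop (a - s).toNat).take ((b - s).toNat - (a - s).toNat) := by
  induction xs generalizing s with
  | nil => simp [PySem.List.enumerate_nil]
  | cons x t ih =>
    rw [PySem.List.enumerate_cons, List.filter_cons]
    by_cases h : a ≤ s ∧ s < b
    · have ha : (a - s).toNat = 0 := by omega
      have ha1 : (a - (s + 1)).toNat = 0 := by omega
      have hb : (b - s).toNat = (b - (s + 1)).toNat + 1 := by omega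
      simp only [h, decide_true, and_self, if_true, List.map_cons, ih, ha, ha1, hb,
        List.drop_zero, Nat.sub_zero, List.take_succ_cons]
    · have hdec : decide (a ≤ (s, x).1 ∧ (s, x).1 < b) = false := by
        simpa using h
      rw [if_neg (by simp [hdec]), ih]
      by_cases has : a ≤ s
      · -- then b ≤ s : everything empty
        have hb : (b - s).toNat = 0 := by omega
        have hb1 : (b - (s + 1)).toNat = 0 := by omega
        simp [hb, hb1]
      · have ha : (a - s).toNat = (a - (s + 1)).toNat + 1 := by omega
        rw [ha, List.drop_succ_cons]
        congr 1
        omega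

-- nonempty drop/take window
lemma drop_take_ne_nil (xs : List String) (aN tN : Nat) (ha : aN < xs.length) (ht : 0 < tN) :
    ((xs.drop aN).take tN).isEmpty = false := by
  rw [List.isEmpty_eq_false_iff, ← List.length_pos_iff, List.length_take, List.length_drop]
  omega

-- per-slide content: A's scatter bucket k equals B's slice k
lemma bucket_eq_slice (pages : List String) (m : Int) (k : Nat)
    (hm : 0 < m) (hmn : m ≤ (pages.length : Int)) :
    (((PySem.List.enumerate pages 0).filter
        (fun p => ((if PySem.Int.floordiv (p.1 * m) (pages.length : Int) ≥ m then m - 1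
                    else PySem.Int.floordiv (p.1 * m) (pages.length : Int)).toNat == k))).map (·.2))
      = PySem.List.slice pages (some (pvLo (pages.length : Int) m (k : Int)))
          (some (pvLo (pages.length : Int) m ((k : Int) + 1))) := by
  have hn : (0 : Int) < (pages.length : Int) := lt_of_lt_of_le hm hmn
  set n : Int := (pages.length : Int) with hn_def
  have hlo0 : 0 ≤ pvLo n m (k : Int) := pvLo_nonneg n m _ hm (le_of_lt hn) (by positivity)
  have hlo1 : 0 ≤ pvLo n m ((k : Int) + 1) := pvLo_nonneg n m _ hm (le_of_lt hn) (by positivity)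
  rw [List.filter_congr (q := fun p : Int × String =>
        decide (pvLo n m (k : Int) ≤ p.1 ∧ p.1 < pvLo n m ((k : Int) + 1))) ?_]
  · rw [filter_enumerate_interval, PySem.List.slice_toNat pages hlo0 hlo1]
    simp
  · intro p hp
    obtain ⟨i, hi, hpeq⟩ := (PySem.List.mem_enumerate_iff pages 0 p).mp hp
    have hp1 : p.1 = (i : Int) := by rw [hpeq]; simp
    have hi_lt : (i : Int) < n := by rw [hn_def]; exact_mod_cast hi
    have hfd0 : 0 ≤ PySem.Int.floordiv ((i : Int) * m) n := by
      rw [PySem.Int.le_floordiv_iff_mul_le hn]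
      have : (0 : Int) ≤ (i : Int) * m := mul_nonneg (by positivity) (le_of_lt hm)
      omega
    have hfd_lt : PySem.Int.floordiv ((i : Int) * m) n < m := by
      rw [PySem.Int.floordiv_lt_iff_lt_mul hn]
      calc (i : Int) * m < n * m := mul_lt_mul_of_pos_right hi_lt hm
        _ = m * n := mul_comm n m
    rw [hp1, if_neg (by omega)]
    refine Bool.coe_iff_coe.mp ?_
    simp only [beq_iff_eq, decide_eq_true_eq]
    rw [show ((PySem.Int.floordiv ((i : Int) * m) n).toNat = k) ↔
          (PySem.Int.floordiv ((i : Int) * m) n = (k : Int)) from by omega, hp1]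
    exact floordiv_eq_iff_interval n m (i : Int) (k : Int) hm hn

-- A's whole main branch equals B's whole main branch
lemma main_branch_eq (pages : List String) (m : Int)
    (hm : 0 < m) (hmn : m ≤ (pages.length : Int)) :
    (((PySem.List.enumerate pages 0).foldl
        (fun acc ip =>
          acc.modify (if PySem.Int.floordiv (ip.1 * m) (pages.length : Int) ≥ m then m - 1
                      else PySem.Int.floordiv (ip.1 * m) (pages.length : Int)).toNat (· ++ [ip.2]))
        (List.replicate m.toNat [])).filter (fun s => !s.isEmpty))
      = (PySem.List.pyRange 0 m 1).map (fun j =>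
          PySem.List.slice pages (some (pvLo (pages.length : Int) m j))
            (some (pvLo (pages.length : Int) m (j + 1)))) := by
  have hn : (0 : Int) < (pages.length : Int) := lt_of_lt_of_le hm hmn
  set n : Int := (pages.length : Int) with hn_def
  have hSR : ((PySem.List.enumerate pages 0).foldl
        (fun acc ip =>
          acc.modify (if PySem.Int.floordiv (ip.1 * m) n ≥ m then m - 1
                      else PySem.Int.floordiv (ip.1 * m) n).toNat (· ++ [ip.2]))
        (List.replicate m.toNat []))
      = (PySem.List.pyRange 0 m 1).map (fun j =>
          PySem.List.slice pages (some (pvLo n m j)) (some (pvLo n m (j + 1)))) := by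
    apply List.ext_getElem?
    intro k
    have hfold := fold_modify_getElem? (PySem.List.enumerate pages 0)
        (fun i => (if PySem.Int.floordiv (i * m) n ≥ m then m - 1
                   else PySem.Int.floordiv (i * m) n).toNat)
        (List.replicate m.toNat []) k
    rw [List.getElem?_map, PySem.List.getElem?_pyRange_one]
    refine hfold.trans ?_
    rw [List.getElem?_replicate]
    by_cases hk : k < m.toNat
    · rw [if_pos hk, if_pos (by omega)]
      simp only [Option.map_some]
      rw [bucket_eq_slice pages m k hm hmn]
      simp
      rfl
    · rw [if_neg hk, if_neg (by omega)]
      simp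
  rw [hSR]
  apply List.filter_eq_self.mpr
  intro s hs
  obtain ⟨j, hj_mem, hj_eq⟩ := List.mem_map.mp hs
  obtain ⟨hj0, hjm⟩ := (PySem.List.mem_pyRange_one).mp hj_mem
  have hlo0 : 0 ≤ pvLo n m j := pvLo_nonneg n m j hm (le_of_lt hn) hj0
  have hstrict : pvLo n m j < pvLo n m (j + 1) := pvLo_strict n m j hm hmn
  have htop : pvLo n m (j + 1) ≤ n := by
    have h1 := pvLo_mono n m (j + 1) m hm (le_of_lt hn) (by omega)
    have h2 := pvLo_top n m hm
    omega
  rw [← hj_eq, PySem.List.slice_toNat pages hlo0 (by omega), Bool.not_eq_true']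
  apply drop_take_ne_nil
  · have : pvLo n m j < n := by omega
    omega
  · omega

-- ===== VERDICT (by name: the statement is the Claim_ definition above) =====
theorem distribute_content_to_slides_spec : Claim_equal_distribute_content_to_slides := by
  intro pages num_slides _
  unfold Spec_distribute_content_to_slides distribute_content_to_slides distribute_content_to_slides_alt
  by_cases hcond : num_slides = -1 ∨ num_slides ≥ (pages.length : Int)
  · simp only [if_pos hcond]
  · simp only [if_neg hcond]
    by_cases hnil : pages = []
    · have hle : num_slides ≤ 0 := by
        subst hnil; simp at hcond; omega
      subst hnil
      simp [hle, PySem.List.enumerate_nil]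
    · rw [if_neg hnil]
      have hn : (0 : Int) < (pages.length : Int) := by
        have := List.length_pos_iff.mpr hnil
        exact_mod_cast this
      have hns : (if num_slides ≤ 0 then 1 else num_slides) = max num_slides 1 := by
        rcases le_or_gt num_slides 0 with h | h
        · rw [if_pos h]; exact (max_eq_right (by omega)).symm
        · rw [if_neg (by omega)]; exact (max_eq_left (by omega)).symm
      have hm : (0 : Int) < max num_slides 1 := by
        have := le_max_right num_slides (1 : Int)
        omega
      have hmn : max num_slides 1 ≤ (pages.length : Int) := by
        have hlt : num_slides < (pages.length : Int) := by omega
        exact max_le (by omega) (by omega)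
      rw [hns]
      exact main_branch_eq pages (max num_slides 1) hm hmn
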